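-- pv_equiv track=rewrite | github.com/PeterLuschny/tablInspector | src/_tablutils.py | SeqToString
-- ===== SOURCE A (Python) =====
-- def SeqToString(
--         seq: list[int],
--         maxchars: int,
--         maxterms: int,
--         sep: str = ' ',
--         offset: int = 0,
--         absval: bool = False,
--     ) -> str:
--     """
--     Converts a sequence of integers into a string representation.
--
--     Args:
--         seq: The sequence of integers to be converted.
--         maxchars: The maximum length of the resulting string.
--         maxterms: The maximum number of terms included.
--         sep: String seperator. Default is ' '.
--         offset: The starting index of the sequence. Defaults to 0.
--         absval: Use the absolute value of the terms. Defaults to False.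
--
--     Returns:
--         str: The string representation of the sequence.
--     """
--     seqstr = ""
--     maxt = maxl = 0
--     for trm in seq[offset:]:
--         maxt += 1
--         if maxt > maxterms:
--             break
--         if absval:
--             s = str(abs(trm)) + sep
--         else:
--             s = str(trm) + sep
--         maxl += len(s)
--         if maxl > maxchars:
--             break
--         seqstr += s
--
--     return seqstr
-- ===== SOURCE B (Python) =====
-- def SeqToString(
--         seq: list[int],
--         maxchars: int,
--         maxterms: int,
--         sep: str = ' ',
--         offset: int = 0,
--         absval: bool = False,
--     ) -> str:
--     # Phase 1: cap the terms considered via slicing (no per-term counter).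
--     terms = seq[offset:][:max(maxterms, 0)]
--     # Phase 2: length-only prefix-sum scan to find how many terms fit.
--     total = 0
--     keep = 0
--     for t in terms:
--         total += len(str(abs(t) if absval else t)) + len(sep)
--         if total > maxchars:
--             break
--         keep += 1
--     # Phase 3: format the kept prefix and join once.
--     return ''.join(str(abs(t) if absval else t) + sep for t in terms[:keep])
-- ===== Notes on version B (the rewrite author's own statement) =====
-- stated objective: alternative
-- what changed: A interleaves counting, formatting, length checking and incremental string concatenation in one loop; B is a three-phase pipeline: cap the terms by slicing (no counter), run a length-only prefix-sum scan to find how many terms fit in maxchars, then format that prefix and join it once.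
import Mathlib
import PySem

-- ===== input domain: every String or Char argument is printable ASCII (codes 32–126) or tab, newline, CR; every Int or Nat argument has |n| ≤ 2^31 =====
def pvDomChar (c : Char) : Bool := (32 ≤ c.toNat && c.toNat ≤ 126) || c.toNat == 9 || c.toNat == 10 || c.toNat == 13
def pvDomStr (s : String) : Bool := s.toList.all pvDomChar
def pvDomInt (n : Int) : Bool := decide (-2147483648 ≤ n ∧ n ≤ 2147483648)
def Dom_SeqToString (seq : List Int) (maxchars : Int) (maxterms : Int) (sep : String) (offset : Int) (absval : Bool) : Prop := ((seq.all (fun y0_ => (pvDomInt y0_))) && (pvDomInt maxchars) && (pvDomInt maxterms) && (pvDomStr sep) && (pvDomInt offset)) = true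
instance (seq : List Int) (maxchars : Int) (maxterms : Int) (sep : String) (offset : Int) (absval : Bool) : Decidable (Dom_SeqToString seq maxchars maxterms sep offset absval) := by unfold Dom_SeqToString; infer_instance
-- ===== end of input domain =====

-- B replaces A's single interleaved loop (count/format/length-check/concat) by a
-- format-all-pieces, prefix-sum length scan, then one join pipeline (objective: alternative).

-- ===== PORT A =====
-- A's loop over seq[offset:] with state (maxt, maxl, seqstr); the two `break`s are the
-- early returns of the recursion.
def pvLoopA (maxchars maxterms : Int) (sep : String) (absval : Bool) :
    List Int → Int → Int → String → String
  | [], _, _, seqstr => seqstr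
  | trm :: rest, maxt, maxl, seqstr =>
    let maxt' := maxt + 1
    if maxt' > maxterms then seqstr
    else
      let s := (if absval then PySem.Int.toStr |trm| else PySem.Int.toStr trm) ++ sep
      let maxl' := maxl + PySem.Str.len s
      if maxl' > maxchars then seqstr
      else pvLoopA maxchars maxterms sep absval rest maxt' maxl' (seqstr ++ s)

def SeqToString (seq : List Int) (maxchars : Int) (maxterms : Int) (sep : String) (offset : Int) (absval : Bool) : String :=
  pvLoopA maxchars maxterms sep absval (PySem.List.slice seq (some offset) none) 0 0 ""

-- ===== PORT B =====
-- B phase 2: length-only prefix-sum scan, counting how many terms fit (breaks early).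
def pvKeepB (maxchars : Int) (sep : String) (absval : Bool) : List Int → Int → Nat
  | [], _ => 0
  | t :: ts, total =>
    let total' := total + PySem.Str.len (if absval then PySem.Int.toStr |t| else PySem.Int.toStr t)
        + PySem.Str.len sep
    if total' > maxchars then 0 else pvKeepB maxchars sep absval ts total' + 1

def SeqToString_alt (seq : List Int) (maxchars : Int) (maxterms : Int) (sep : String) (offset : Int) (absval : Bool) : String :=
  let terms := PySem.List.slice (PySem.List.slice seq (some offset) none) none (some (max maxterms 0))
  PySem.Str.join "" ((terms.take (pvKeepB maxchars sep absval terms 0)).map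
      (fun t => (if absval then PySem.Int.toStr |t| else PySem.Int.toStr t) ++ sep))

-- ===== PRECONDITION & SPEC =====
def Spec_SeqToString (seq : List Int) (maxchars : Int) (maxterms : Int) (sep : String) (offset : Int) (absval : Bool) (out : String) : Prop := out = SeqToString_alt seq maxchars maxterms sep offset absval
instance (seq : List Int) (maxchars : Int) (maxterms : Int) (sep : String) (offset : Int) (absval : Bool) (out : String) : Decidable (Spec_SeqToString seq maxchars maxterms sep offset absval out) := by unfold Spec_SeqToString; infer_instance

-- ===== CLAIM (what is proved, stated in full; the proofs are below) =====
def Claim_equal_SeqToString : Prop := ∀ (seq : List Int) (maxchars : Int) (maxterms : Int) (sep : String) (offset : Int) (absval : Bool), Dom_SeqToString seq maxchars maxterms sep offset absval → Spec_SeqToString seq maxchars maxterms sep offset absval (SeqToString seq maxchars maxterms sep offset absval)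

-- ===== LEMMAS AND PROOFS =====
def pvFmt (sep : String) (absval : Bool) (t : Int) : String :=
  (if absval then PySem.Int.toStr |t| else PySem.Int.toStr t) ++ sep

def pvRhs (maxchars : Int) (sep : String) (absval : Bool) (ts : List Int) (maxl : Int) : String :=
  PySem.Str.join "" ((ts.take (pvKeepB maxchars sep absval ts maxl)).map (pvFmt sep absval))

theorem pvLen_split (a b : String) :
    PySem.Str.len (a ++ b) = PySem.Str.len a + PySem.Str.len b := by
  simp [PySem.Str.len_eq]

theorem pvStr_toList_inj {a b : String} (h : a.toList = b.toList) : a = b := by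
  have := congrArg String.ofList h; simpa using this

theorem pvJoin_nil : PySem.Str.join "" ([] : List String) = "" := by decide

theorem pvJoin_cons (p : String) (ps : List String) :
    PySem.Str.join "" (p :: ps) = p ++ PySem.Str.join "" ps := by
  apply pvStr_toList_inj
  cases ps <;> simp [PySem.Str.join, PySem.Chars.join, List.intercalate]

-- Invariant relating A's loop state to B's remaining terms.
theorem pvLoop_eq (maxchars maxterms : Int) (sep : String) (absval : Bool) :
    ∀ (l : List Int) (maxt maxl : Int) (acc : String),
      pvLoopA maxchars maxterms sep absval l maxt maxl acc
        = acc ++ pvRhs maxchars sep absval (l.take (maxterms - maxt).toNat) maxl := by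
  intro l
  induction l with
  | nil =>
    intro maxt maxl acc
    simp [pvLoopA, pvRhs, pvKeepB, pvJoin_nil]
  | cons trm rest ih =>
    intro maxt maxl acc
    by_cases hcnt : maxt + 1 > maxterms
    · have h0 : (maxterms - maxt).toNat = 0 := by omega
      simp [pvLoopA, hcnt, h0, pvRhs, pvKeepB, pvJoin_nil]
    · have h1 : (maxterms - maxt).toNat = (maxterms - (maxt + 1)).toNat + 1 := by omega
      rw [h1, List.take_succ_cons]
      have hsplit : maxl + PySem.Str.len
            ((if absval then PySem.Int.toStr |trm| else PySem.Int.toStr trm) ++ sep)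
          = maxl + PySem.Str.len (if absval then PySem.Int.toStr |trm| else PySem.Int.toStr trm)
              + PySem.Str.len sep := by
        rw [pvLen_split, add_assoc]
      by_cases hlen : maxl + PySem.Str.len (pvFmt sep absval trm) > maxchars
      · simp only [pvFmt] at hlen
        simp only [pvLoopA]
        rw [if_neg hcnt, if_pos hlen]
        rw [hsplit] at hlen
        simp only [pvRhs, pvKeepB]
        rw [if_pos hlen]
        simp [pvJoin_nil]
      · simp only [pvFmt] at hlen
        simp only [pvLoopA]
        rw [if_neg hcnt, if_neg hlen]
        rw [ih]
        rw [hsplit] at hlen ⊢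
        simp only [pvRhs, pvKeepB]
        rw [if_neg hlen, List.take_succ_cons, List.map_cons, pvJoin_cons]
        simp [pvFmt, String.append_assoc]

-- ===== VERDICT (by name: the statement is the Claim_ definition above) =====
theorem SeqToString_spec : Claim_equal_SeqToString := by
  intro seq maxchars maxterms sep offset absval _
  unfold Spec_SeqToString SeqToString SeqToString_alt
  rw [pvLoop_eq]
  have hs : PySem.List.slice (PySem.List.slice seq (some offset) none) none (some (max maxterms 0))
      = (PySem.List.slice seq (some offset) none).take (max maxterms 0).toNat :=
    PySem.List.slice_to _ (le_max_right maxterms 0)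
  have h : (max maxterms 0).toNat = (maxterms - 0).toNat := by omega
  simp only [hs, h, pvRhs]
  rfl
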